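-- pv_equiv track=rewrite | github.com/johnsuperusernavarro-lab/cobrador-factura | app/services/xls_normalizer.py | _inferir_software
-- ===== SOURCE A (Python) =====
-- def _inferir_software(headers: list[str]) -> str:
--     """Intenta identificar el software por patrones en los headers."""
--     texto = " ".join(h.lower() for h in headers)
--     if "alegra" in texto:
--         return "Alegra"
--     if "monica" in texto or "comprobante" in texto:
--         return "Monica"
--     if "dora" in texto:
--         return "Dora"
--     if "quickbooks" in texto or "quickbook" in texto:
--         return "QuickBooks"
--     # Si tiene la columna "saldo" y "vencimiento" es probablemente ecuatoriano
--     if "saldo" in texto and "vencimiento" in texto: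
--         return "Genérico EC"
--     return "Genérico"
-- ===== SOURCE B (Python) =====
-- # B: two-stage algorithm — a per-header keyword-extraction pass (no joined text) into a hit set,
-- # then a priority-minimum decision over the hit set. Correct because no keyword contains a space,
-- # so a keyword occurs in the space-joined lowered text iff it occurs in some single lowered header.
--
-- _PRIORITY = {"alegra": 0, "monica": 1, "comprobante": 1, "dora": 2,
--              "quickbooks": 3, "quickbook": 3}
-- _LABELS = ["Alegra", "Monica", "Dora", "QuickBooks"]
-- _KEYWORDS = tuple(_PRIORITY) + ("saldo", "vencimiento")
--
--
-- def _inferir_software(headers: list[str]) -> str: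
--     hits = set()
--     for h in headers:
--         hl = h.lower()
--         for kw in _KEYWORDS:
--             if kw in hl:
--                 hits.add(kw)
--     ranked = [rank for kw, rank in _PRIORITY.items() if kw in hits]
--     if ranked:
--         return _LABELS[min(ranked)]
--     if "saldo" in hits and "vencimiento" in hits:
--         return "Genérico EC"
--     return "Genérico"
-- ===== Notes on version B (the rewrite author's own statement) =====
-- stated objective: alternative
-- what changed: A lazily tests substrings of one space-joined lowered text in branch order; B never joins: a per-header extraction pass collects every matched keyword into a set, then the label is picked by taking the minimum priority rank among matched keywords (AND-rule checked on the set), correct since no keyword contains a space.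
import Mathlib
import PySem

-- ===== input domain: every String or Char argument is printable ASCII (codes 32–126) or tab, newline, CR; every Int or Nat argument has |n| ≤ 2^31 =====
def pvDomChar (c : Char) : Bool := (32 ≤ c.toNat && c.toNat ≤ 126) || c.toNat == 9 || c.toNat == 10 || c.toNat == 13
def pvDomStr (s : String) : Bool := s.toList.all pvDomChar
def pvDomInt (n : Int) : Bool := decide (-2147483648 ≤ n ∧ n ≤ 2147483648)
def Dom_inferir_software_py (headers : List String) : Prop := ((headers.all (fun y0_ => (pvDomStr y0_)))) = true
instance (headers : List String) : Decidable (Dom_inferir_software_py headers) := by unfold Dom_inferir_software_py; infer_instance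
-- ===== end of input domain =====

-- B replaces A's lazy substring tests on one space-joined text by a per-header keyword-extraction
-- pass into a hit set followed by a minimum-priority decision (objective: alternative algorithm).

-- ===== PORT A =====
def inferir_software_py (headers : List String) : String :=
  let texto := PySem.Str.join " " (headers.map (fun h => PySem.Str.lower h))
  if PySem.Str.isIn "alegra" texto then "Alegra"
  else if PySem.Str.isIn "monica" texto || PySem.Str.isIn "comprobante" texto then "Monica"
  else if PySem.Str.isIn "dora" texto then "Dora"
  else if PySem.Str.isIn "quickbooks" texto || PySem.Str.isIn "quickbook" texto then "QuickBooks"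
  else if PySem.Str.isIn "saldo" texto && PySem.Str.isIn "vencimiento" texto then "Genérico EC"
  else "Genérico"

-- ===== PORT B =====
-- _PRIORITY: keyword ↦ priority rank of its label (dict, ported as association list in insertion order)
def pvPriority : List (String × Nat) :=
  [("alegra", 0), ("monica", 1), ("comprobante", 1), ("dora", 2), ("quickbooks", 3), ("quickbook", 3)]
-- _LABELS: label of each priority rank
def pvLabels : List String := ["Alegra", "Monica", "Dora", "QuickBooks"]
-- _KEYWORDS = tuple(_PRIORITY) + ("saldo", "vencimiento")
def pvKeywords : List String :=
  ["alegra", "monica", "comprobante", "dora", "quickbooks", "quickbook", "saldo", "vencimiento"]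

-- extraction pass: hits = set of keywords occurring in some lowered header
def pvHits (headers : List String) : PySem.Set String :=
  headers.foldl
    (fun s h =>
      let hl := PySem.Str.lower h
      pvKeywords.foldl (fun s kw => if PySem.Str.isIn kw hl then PySem.Set.add s kw else s) s)
    PySem.Set.empty

def inferir_software_py_alt (headers : List String) : String :=
  let hits := pvHits headers
  let ranked := (pvPriority.filter (fun p => PySem.Set.contains hits p.1)).map (fun p => p.2)
  match PySem.List.min? ranked (fun x => x) with
  | some m => (PySem.List.pyGet? pvLabels (Int.ofNat m)).getD "Genérico"
      -- _LABELS[min(ranked)]: every rank in pvPriority is < pvLabels.length, so pyGet? is always some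
  | none =>
      if PySem.Set.contains hits "saldo" && PySem.Set.contains hits "vencimiento" then "Genérico EC"
      else "Genérico"

-- ===== PRECONDITION & SPEC =====
def Spec_inferir_software_py (headers : List String) (out : String) : Prop := out = inferir_software_py_alt headers
instance (headers : List String) (out : String) : Decidable (Spec_inferir_software_py headers out) := by unfold Spec_inferir_software_py; infer_instance

-- ===== CLAIM (what is proved, stated in full; the proofs are below) =====
def Claim_equal_inferir_software_py : Prop := ∀ (headers : List String), Dom_inferir_software_py headers → Spec_inferir_software_py headers (inferir_software_py headers)

-- ===== LEMMAS AND PROOFS =====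

-- a space-free prefix of `a ++ ' ' :: b` is a prefix of `a`
lemma pvPrefix_split {kw : List Char} (hc : ' ' ∉ kw) :
    ∀ {a b : List Char}, kw <+: a ++ ' ' :: b → kw <+: a := by
  induction kw with
  | nil => intro a b _; exact List.nil_prefix
  | cons k ks ih =>
    intro a b h
    cases a with
    | nil =>
      rw [List.nil_append, List.cons_prefix_cons] at h
      exact absurd (h.1 ▸ List.mem_cons_self) hc
    | cons x a' =>
      rw [List.cons_append] at h
      rw [List.cons_prefix_cons] at h ⊢
      exact ⟨h.1, ih (fun hm => hc (List.mem_cons_of_mem _ hm)) h.2⟩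

-- a nonempty space-free infix of `a ++ ' ' :: b` lies inside `a` or inside `b`
lemma pvInfix_split {kw : List Char} (hc : ' ' ∉ kw) (hne : kw ≠ []) :
    ∀ (a : List Char) {b : List Char}, kw <:+: a ++ ' ' :: b → kw <:+: a ∨ kw <:+: b := by
  intro a
  induction a with
  | nil =>
    intro b h
    rw [List.nil_append] at h
    rcases List.infix_cons_iff.mp h with hp | hi
    · cases kw with
      | nil => exact absurd rfl hne
      | cons k ks =>
        rw [List.cons_prefix_cons] at hp
        exact absurd (hp.1 ▸ List.mem_cons_self) hc
    · exact Or.inr hi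
  | cons x a' ih =>
    intro b h
    rw [List.cons_append] at h
    rcases List.infix_cons_iff.mp h with hp | hi
    · exact Or.inl (pvPrefix_split hc (a := x :: a') (by simpa using hp)).isInfix
    · rcases ih hi with h1 | h2
      · exact Or.inl (List.infix_cons_iff.mpr (Or.inr h1))
      · exact Or.inr h2

-- a nonempty space-free word is an infix of the space-joined parts iff it is an infix of some part
lemma pvInfix_join_iff {kw : List Char} (hc : ' ' ∉ kw) (hne : kw ≠ []) :
    ∀ (parts : List (List Char)),
      (kw <:+: PySem.Chars.join [' '] parts ↔ ∃ p ∈ parts, kw <:+: p) := by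
  intro parts
  induction parts with
  | nil =>
    simp [PySem.Chars.join_nil, List.infix_nil, hne]
  | cons p ps ih =>
    cases ps with
    | nil => simp [PySem.Chars.join_singleton]
    | cons q rest =>
      rw [PySem.Chars.join_cons_cons, List.append_assoc, List.singleton_append]
      constructor
      · intro h
        rcases pvInfix_split hc hne p h with h1 | h2
        · exact ⟨p, List.mem_cons_self, h1⟩
        · obtain ⟨p', hp', hkw⟩ := ih.mp h2
          exact ⟨p', List.mem_cons_of_mem _ hp', hkw⟩
      · rintro ⟨p', hp', hkw⟩
        rcases List.mem_cons.mp hp' with rfl | hp'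
        · exact hkw.trans (List.prefix_append _ _).isInfix
        · exact (List.infix_cons_iff.mpr (Or.inr (ih.mpr ⟨p', hp', hkw⟩))).trans
            (List.suffix_append _ _).isInfix

-- A's test on the joined lowered text equals B's per-header any-test
lemma pvIsIn_join (kw : String) (headers : List String)
    (hc : ' ' ∉ kw.toList) (hne : kw.toList ≠ []) :
    PySem.Str.isIn kw (PySem.Str.join " " (headers.map (fun h => PySem.Str.lower h)))
      = headers.any (fun h => PySem.Str.isIn kw (PySem.Str.lower h)) := by
  rw [Bool.eq_iff_iff]
  simp only [PySem.Str.isIn_iff_infix, List.any_eq_true]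
  rw [show (PySem.Str.join " " (headers.map (fun h => PySem.Str.lower h))).toList
        = PySem.Chars.join [' '] ((headers.map (fun h => PySem.Str.lower h)).map String.toList)
      from by simp [PySem.Str.toList_join]]
  rw [pvInfix_join_iff hc hne]
  simp [List.mem_map]

-- membership after the inner keyword loop over one header
lemma pvMem_inner (hl : String) (kw : String) :
    ∀ (ks : List String) (s : PySem.Set String),
      (kw ∈ ks.foldl (fun s k => if PySem.Str.isIn k hl then PySem.Set.add s k else s) s
        ↔ kw ∈ s ∨ (kw ∈ ks ∧ PySem.Str.isIn kw hl = true)) := by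
  intro ks
  induction ks with
  | nil => simp
  | cons k ks ih =>
    intro s
    rw [List.foldl_cons]
    simp only [List.mem_cons]
    by_cases hin : PySem.Str.isIn k hl = true
    · rw [if_pos hin, ih, PySem.Set.mem_add]
      by_cases hk : kw = k
      · subst hk; tauto
      · tauto
    · rw [if_neg hin, ih]
      by_cases hk : kw = k
      · subst hk; tauto
      · tauto
-- membership in the extracted hit set
lemma pvMem_hits (headers : List String) (kw : String) :
    kw ∈ pvHits headers
      ↔ kw ∈ pvKeywords ∧ headers.any (fun h => PySem.Str.isIn kw (PySem.Str.lower h)) = true := by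
  have aux : ∀ (hs : List String) (s : PySem.Set String),
      (kw ∈ hs.foldl
          (fun s h =>
            let hl := PySem.Str.lower h
            pvKeywords.foldl (fun s kw => if PySem.Str.isIn kw hl then PySem.Set.add s kw else s) s)
          s
        ↔ kw ∈ s ∨ (kw ∈ pvKeywords ∧ hs.any (fun h => PySem.Str.isIn kw (PySem.Str.lower h)) = true)) := by
    intro hs
    induction hs with
    | nil => simp
    | cons h hs ih =>
      intro s
      rw [List.foldl_cons]
      simp only []
      rw [ih, pvMem_inner]
      simp only [List.any_cons, Bool.or_eq_true]
      tauto
  rw [pvHits, aux]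
  simp [PySem.Set.empty]

-- contains on the hit set, for a keyword of the table
lemma pvContains_hits (headers : List String) (kw : String) (hkw : kw ∈ pvKeywords) :
    PySem.Set.contains (pvHits headers) kw
      = headers.any (fun h => PySem.Str.isIn kw (PySem.Str.lower h)) := by
  rw [Bool.eq_iff_iff, PySem.Set.contains_iff, pvMem_hits]
  simp [hkw]

-- ===== VERDICT (by name: the statement is the Claim_ definition above) =====
theorem inferir_software_py_spec : Claim_equal_inferir_software_py := by
  intro headers _
  unfold Spec_inferir_software_py
  simp only [inferir_software_py, inferir_software_py_alt, pvPriority,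
    List.filter_cons, List.filter_nil]
  rw [pvIsIn_join "alegra" headers (by decide) (by decide),
      pvIsIn_join "monica" headers (by decide) (by decide),
      pvIsIn_join "comprobante" headers (by decide) (by decide),
      pvIsIn_join "dora" headers (by decide) (by decide),
      pvIsIn_join "quickbooks" headers (by decide) (by decide),
      pvIsIn_join "quickbook" headers (by decide) (by decide),
      pvIsIn_join "saldo" headers (by decide) (by decide),
      pvIsIn_join "vencimiento" headers (by decide) (by decide),
      pvContains_hits headers "alegra" (by decide),
      pvContains_hits headers "monica" (by decide),
      pvContains_hits headers "comprobante" (by decide),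
      pvContains_hits headers "dora" (by decide),
      pvContains_hits headers "quickbooks" (by decide),
      pvContains_hits headers "quickbook" (by decide),
      pvContains_hits headers "saldo" (by decide),
      pvContains_hits headers "vencimiento" (by decide)]
  generalize headers.any (fun h => PySem.Str.isIn "alegra" (PySem.Str.lower h)) = ba
  generalize headers.any (fun h => PySem.Str.isIn "monica" (PySem.Str.lower h)) = bm
  generalize headers.any (fun h => PySem.Str.isIn "comprobante" (PySem.Str.lower h)) = bc
  generalize headers.any (fun h => PySem.Str.isIn "dora" (PySem.Str.lower h)) = bd
  generalize headers.any (fun h => PySem.Str.isIn "quickbooks" (PySem.Str.lower h)) = bq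
  generalize headers.any (fun h => PySem.Str.isIn "quickbook" (PySem.Str.lower h)) = bq2
  generalize headers.any (fun h => PySem.Str.isIn "saldo" (PySem.Str.lower h)) = bs
  generalize headers.any (fun h => PySem.Str.isIn "vencimiento" (PySem.Str.lower h)) = bv
  cases ba <;> cases bm <;> cases bc <;> cases bd <;> cases bq <;> cases bq2 <;> cases bs <;> cases bv <;> rfl
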